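-- pv_equiv track=rewrite | github.com/kirillbk/Advent-of-code | 2023/5/solution.py | _apply_map_to_ranges
-- ===== SOURCE A (Python) =====
-- def _apply_map_to_ranges(map: list[(int, int, int)], ranges: list) -> list[int, int]:
--     new_ranges = []
--     for dst, src, length in map:
--         delta = dst - src
--         not_intersected_ranges = []
--
--         for start, end  in ranges:
--             # ----|intersection|
--             if start < src and src < end <= src + length:
--                 not_intersected_ranges.append((start, src))
--                 new_ranges.append((dst, end + delta))
--             # ----|intersection|----
--             elif start < src and end > src + length:
--                 not_intersected_ranges.append((start, src))
--                 not_intersected_ranges.append((src + length, end))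
--                 new_ranges.append((dst, dst + length))
--             # |intersection|
--             elif src <= start < src + length and end <= src + length:
--                 new_ranges.append((start + delta, end + delta))
--             # |intersection|----
--             elif src <= start < src + length and end > src + length:
--                 new_ranges.append((start + delta, dst + length))
--                 not_intersected_ranges.append((src + length, end))
--             # no intersection
--             # -------------
--             else:
--                 not_intersected_ranges.append((start, end))
--
--         ranges = not_intersected_ranges
--
--     return new_ranges + not_intersected_ranges
-- ===== SOURCE B (Python) =====
-- def _apply_map_to_ranges(map: list[(int, int, int)], ranges: list) -> list[int, int]:
--     if not map:
--         return list(ranges)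
--     dst, src, length = map[0]
--     delta = dst - src
--     window_end = src + length
--     mapped = []
--     carry = []
--     for start, end in ranges:
--         # the range meets the window: its start lies in the window, or the
--         # window's start (or everything past the window) lies inside the range
--         if (src <= start < window_end) or (start < src < end) or (start < src and window_end < end):
--             lo = max(start, src)
--             hi = min(end, window_end)
--             mapped.append((lo + delta, hi + delta))
--             if start < lo:
--                 carry.append((start, lo))
--             if hi < end:
--                 carry.append((hi, end))
--         else:
--             carry.append((start, end))
--     return mapped + _apply_map_to_ranges(map[1:], carry)
-- ===== Notes on version B (the rewrite author's own statement) =====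
-- stated objective: simpler
-- what changed: B recurses over the map entries and splits each range with one clamped-overlap computation (lo=max(start,src), hi=min(end,src+length)) behind a single hit test, instead of A's nested loops whose four-way branch cascade spells out every split shape and whose result leaks out of the loop variable.
-- crash fix: On an empty map A raises UnboundLocalError (it returns the never-assigned not_intersected_ranges); B returns the ranges unchanged. — e.g. on _apply_map_to_ranges([], [(1, 2)]): A raises UnboundLocalError, B returns [(1, 2)]
import Mathlib
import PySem

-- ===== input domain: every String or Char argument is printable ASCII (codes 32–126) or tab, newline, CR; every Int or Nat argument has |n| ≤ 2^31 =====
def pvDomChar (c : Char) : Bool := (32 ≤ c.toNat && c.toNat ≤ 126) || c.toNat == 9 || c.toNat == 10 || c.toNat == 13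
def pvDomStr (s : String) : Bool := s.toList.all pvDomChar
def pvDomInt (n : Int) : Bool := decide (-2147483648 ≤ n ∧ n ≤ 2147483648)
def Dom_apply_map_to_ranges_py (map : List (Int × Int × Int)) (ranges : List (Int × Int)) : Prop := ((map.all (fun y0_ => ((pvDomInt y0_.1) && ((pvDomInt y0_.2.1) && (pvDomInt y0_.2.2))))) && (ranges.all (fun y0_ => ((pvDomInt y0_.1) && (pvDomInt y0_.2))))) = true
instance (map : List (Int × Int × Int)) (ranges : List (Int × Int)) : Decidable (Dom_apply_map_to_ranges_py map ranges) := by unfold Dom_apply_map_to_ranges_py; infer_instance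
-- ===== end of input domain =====

-- B replaces A's four-way branch cascade (and leaked inner loop variable) by recursion over the
-- map entries with a single clamped-overlap split per range: simpler, same output on the stated domain.


-- ===== PORT A =====
-- inner loop body of A: acc = (not_intersected_ranges, new_ranges), the four branches in A's order
def stepRangeA (dst src length : Int) (acc : List (Int × Int) × List (Int × Int)) (r : Int × Int) :
    List (Int × Int) × List (Int × Int) :=
  let delta := dst - src
  let (nir, nr) := acc
  let (s, e) := r
  if s < src ∧ src < e ∧ e ≤ src + length then
    (nir ++ [(s, src)], nr ++ [(dst, e + delta)])
  else if s < src ∧ e > src + length then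
    (nir ++ [(s, src), (src + length, e)], nr ++ [(dst, dst + length)])
  else if src ≤ s ∧ s < src + length ∧ e ≤ src + length then
    (nir, nr ++ [(s + delta, e + delta)])
  else if src ≤ s ∧ s < src + length ∧ e > src + length then
    (nir ++ [(src + length, e)], nr ++ [(s + delta, dst + length)])
  else
    (nir ++ [(s, e)], nr)

-- outer loop body of A: acc = (new_ranges, ranges)
def stepEntryA (acc : List (Int × Int) × List (Int × Int)) (ent : Int × Int × Int) :
    List (Int × Int) × List (Int × Int) :=
  let (nr, rs) := acc
  let (dst, src, length) := ent
  let p := rs.foldl (stepRangeA dst src length) ([], nr)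
  (p.2, p.1)

-- on map = [] Python A raises UnboundLocalError (excluded by Pre_); the port returns ranges there
def apply_map_to_ranges_py (map : List (Int × Int × Int)) (ranges : List (Int × Int)) : List (Int × Int) :=
  let p := map.foldl stepEntryA ([], ranges)
  p.1 ++ p.2

-- ===== PORT B =====
-- B's loop body: acc = (mapped, carry); on a hit the overlap is clamped to [max(s,src), min(e, wend))
def splitOneB (src wend delta : Int) (acc : List (Int × Int) × List (Int × Int)) (r : Int × Int) :
    List (Int × Int) × List (Int × Int) :=
  let (mapped, carry) := acc
  let (s, e) := r
  if (src ≤ s ∧ s < wend) ∨ (s < src ∧ src < e) ∨ (s < src ∧ wend < e) then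
    let lo := max s src
    let hi := min e wend
    (mapped ++ [(lo + delta, hi + delta)],
     carry ++ (if s < lo then [(s, lo)] else []) ++ (if hi < e then [(hi, e)] else []))
  else
    (mapped, carry ++ [(s, e)])

def apply_map_to_ranges_py_alt : List (Int × Int × Int) → List (Int × Int) → List (Int × Int)
  | [], ranges => ranges
  | (dst, src, length) :: rest, ranges =>
    let delta := dst - src
    let p := ranges.foldl (splitOneB src (src + length) delta) ([], [])
    p.1 ++ apply_map_to_ranges_py_alt rest p.2

-- ===== PRECONDITION & SPEC =====
-- Pre_ excludes only map = [], where Python A raises UnboundLocalError (not_intersected_ranges is never assigned)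
def Pre_apply_map_to_ranges_py (map : List (Int × Int × Int)) (ranges : List (Int × Int)) : Prop :=
  map ≠ []
instance (map : List (Int × Int × Int)) (ranges : List (Int × Int)) : Decidable (Pre_apply_map_to_ranges_py map ranges) := by unfold Pre_apply_map_to_ranges_py; infer_instance

def pvWitness_apply_map_to_ranges_py : (List (Int × Int × Int)) × (List (Int × Int)) :=
  ([(5, 0, 3)], [(1, 4)])

-- On an empty map A raises UnboundLocalError (it returns the never-assigned not_intersected_ranges); B returns the ranges unchanged.
def Raises_apply_map_to_ranges_py (map : List (Int × Int × Int)) (ranges : List (Int × Int)) : Prop :=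
  map = []
instance (map : List (Int × Int × Int)) (ranges : List (Int × Int)) : Decidable (Raises_apply_map_to_ranges_py map ranges) := by unfold Raises_apply_map_to_ranges_py; infer_instance
def pvRaiseWitness_apply_map_to_ranges_py : (List (Int × Int × Int)) × (List (Int × Int)) := ([], [(1, 2)])
def pvRaiseWitnessOut_apply_map_to_ranges_py : List (Int × Int) := [(1, 2)]

def Spec_apply_map_to_ranges_py (map : List (Int × Int × Int)) (ranges : List (Int × Int)) (out : List (Int × Int)) : Prop := out = apply_map_to_ranges_py_alt map ranges
instance (map : List (Int × Int × Int)) (ranges : List (Int × Int)) (out : List (Int × Int)) : Decidable (Spec_apply_map_to_ranges_py map ranges out) := by unfold Spec_apply_map_to_ranges_py; infer_instance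

-- ===== CLAIM (what is proved, stated in full; the proofs are below) =====
def Claim_equal_apply_map_to_ranges_py : Prop := ∀ (map : List (Int × Int × Int)) (ranges : List (Int × Int)), Dom_apply_map_to_ranges_py map ranges → Pre_apply_map_to_ranges_py map ranges → Spec_apply_map_to_ranges_py map ranges (apply_map_to_ranges_py map ranges)
def Claim_raises_apply_map_to_ranges_py : Prop := (∀ (map : List (Int × Int × Int)) (ranges : List (Int × Int)), Dom_apply_map_to_ranges_py map ranges → Raises_apply_map_to_ranges_py map ranges → ¬ Pre_apply_map_to_ranges_py map ranges) ∧ (Dom_apply_map_to_ranges_py (pvRaiseWitness_apply_map_to_ranges_py.1) (pvRaiseWitness_apply_map_to_ranges_py.2) ∧ Raises_apply_map_to_ranges_py (pvRaiseWitness_apply_map_to_ranges_py.1) (pvRaiseWitness_apply_map_to_ranges_py.2) ∧ apply_map_to_ranges_py_alt (pvRaiseWitness_apply_map_to_ranges_py.1) (pvRaiseWitness_apply_map_to_ranges_py.2) = pvRaiseWitnessOut_apply_map_to_ranges_py)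

-- ===== LEMMAS AND PROOFS =====

-- each step only appends to both accumulator components
lemma stepRangeA_shift (dst src length : Int) (a b : List (Int × Int)) (r : Int × Int) :
    stepRangeA dst src length (a, b) r =
      (a ++ (stepRangeA dst src length ([], []) r).1, b ++ (stepRangeA dst src length ([], []) r).2) := by
  obtain ⟨s, e⟩ := r
  simp only [stepRangeA]
  split_ifs <;> simp

lemma splitOneB_shift (src wend delta : Int) (a b : List (Int × Int)) (r : Int × Int) :
    splitOneB src wend delta (a, b) r =
      (a ++ (splitOneB src wend delta ([], []) r).1, b ++ (splitOneB src wend delta ([], []) r).2) := by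
  obtain ⟨s, e⟩ := r
  simp only [splitOneB]
  split_ifs <;> simp

-- fold-level version of the shift for B's loop
lemma splitOneB_foldl_shift (src wend delta : Int) :
    ∀ (rs : List (Int × Int)) (p : List (Int × Int) × List (Int × Int)),
      rs.foldl (splitOneB src wend delta) p =
        (p.1 ++ (rs.foldl (splitOneB src wend delta) ([], [])).1,
         p.2 ++ (rs.foldl (splitOneB src wend delta) ([], [])).2) := by
  intro rs
  induction rs with
  | nil => intro p; simp
  | cons r t ih =>
    intro p
    obtain ⟨a, b⟩ := p
    simp only [List.foldl_cons]
    rw [splitOneB_shift src wend delta a b r, ih]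
    conv_rhs => rw [ih (splitOneB src wend delta ([], []) r)]
    simp [List.append_assoc]

-- A's branch cascade computes exactly B's hit-test + clamped split (swapped pair), on every range
lemma step_agree (dst src length : Int) (r : Int × Int) :
    stepRangeA dst src length ([], []) r =
      ((splitOneB src (src + length) (dst - src) ([], []) r).2,
       (splitOneB src (src + length) (dst - src) ([], []) r).1) := by
  obtain ⟨s, e⟩ := r
  simp only [stepRangeA, splitOneB]
  by_cases h1 : s < src
  · have hlo : max s src = src := max_eq_right (le_of_lt h1)
    by_cases h2 : src + length < e
    · have hhi : min e (src + length) = src + length := min_eq_right (le_of_lt h2)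
      simp only [hlo, hhi]
      split_ifs <;> simp_all <;> omega
    · by_cases h3 : src < e
      · have hhi : min e (src + length) = e := min_eq_left (by omega)
        simp only [hlo, hhi]
        split_ifs <;> simp_all <;> omega
      · simp only [hlo]
        split_ifs <;> simp_all <;> omega
  · have hlo : max s src = s := max_eq_left (by omega)
    by_cases h2 : s < src + length
    · by_cases h3 : e ≤ src + length
      · have hhi : min e (src + length) = e := min_eq_left h3
        simp only [hlo, hhi]
        split_ifs <;> simp_all <;> omega
      · have hhi : min e (src + length) = src + length := min_eq_right (by omega)
        simp only [hlo, hhi]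
        split_ifs <;> simp_all <;> omega
    · simp only [hlo]
      split_ifs <;> simp_all <;> omega

-- A's inner loop over the ranges equals B's clamped split of the same ranges
lemma inner_eq (dst src length : Int) :
    ∀ (rs : List (Int × Int)) (nir0 nr0 : List (Int × Int)),
      rs.foldl (stepRangeA dst src length) (nir0, nr0) =
        (nir0 ++ (rs.foldl (splitOneB src (src + length) (dst - src)) ([], [])).2,
         nr0 ++ (rs.foldl (splitOneB src (src + length) (dst - src)) ([], [])).1) := by
  intro rs
  induction rs with
  | nil => intro nir0 nr0; simp
  | cons r t ih =>
    intro nir0 nr0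
    simp only [List.foldl_cons]
    rw [stepRangeA_shift, step_agree dst src length r]
    rw [ih]
    conv_rhs => rw [splitOneB_foldl_shift src (src + length) (dst - src) t
      (splitOneB src (src + length) (dst - src) ([], []) r)]
    simp [List.append_assoc]

-- the whole computation: A's outer fold equals B's recursion
lemma outer_eq :
    ∀ (map : List (Int × Int × Int)) (rs : List (Int × Int)) (nr0 : List (Int × Int)),
      (map.foldl stepEntryA (nr0, rs)).1 ++ (map.foldl stepEntryA (nr0, rs)).2 =
        nr0 ++ apply_map_to_ranges_py_alt map rs := by
  intro map
  induction map with
  | nil => intro rs nr0; simp [apply_map_to_ranges_py_alt]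
  | cons ent rest ih =>
    intro rs nr0
    obtain ⟨dst, src, length⟩ := ent
    simp only [List.foldl_cons]
    have hstep : stepEntryA (nr0, rs) (dst, src, length) =
        (nr0 ++ (rs.foldl (splitOneB src (src + length) (dst - src)) ([], [])).1,
         (rs.foldl (splitOneB src (src + length) (dst - src)) ([], [])).2) := by
      simp only [stepEntryA]
      rw [inner_eq dst src length rs [] nr0]
      simp
    rw [hstep, ih]
    simp [apply_map_to_ranges_py_alt, List.append_assoc]

-- ===== VERDICT (by name: the statement is the Claim_ definition above) =====
theorem apply_map_to_ranges_py_spec : Claim_equal_apply_map_to_ranges_py := by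
  intro map ranges _hdom _hpre
  show apply_map_to_ranges_py map ranges = apply_map_to_ranges_py_alt map ranges
  simp only [apply_map_to_ranges_py]
  simpa using outer_eq map ranges []

@[simp]
theorem apply_map_to_ranges_py_raises : Claim_raises_apply_map_to_ranges_py := by
  unfold Claim_raises_apply_map_to_ranges_py
  exact ⟨fun map ranges _ hraise hpre => hpre hraise, by decide⟩
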